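-- pv_equiv track=rewrite | github.com/phoenix-agents/phoenix-core | skill_comparison.py | _generate_flow_ascii
-- ===== SOURCE A (Python) =====
-- from typing import Dict, Any, List, Optional, Set, Tuple
-- from collections import defaultdict
--
-- def _generate_flow_ascii(paths: List[Tuple[Tuple[str, str], int]]) -> str:
--     """Generate ASCII visualization of knowledge flow."""
--     if not paths:
--         return "No knowledge flow data available"
--
--     lines = ["Knowledge Flow Visualization:", "=" * 50]
--
--     # Group by source
--     sources = defaultdict(list)
--     for (src, tgt), count in paths:
--         sources[src].append((tgt, count))
--
--     for source, targets in sorted(sources.items()):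
--         lines.append(f"\n{source} (source)")
--         for target, count in sorted(targets, key=lambda x: x[1], reverse=True):
--             lines.append(f"  --> {target} ({count} knowledge transfers)")
--
--     return "\n".join(lines)
-- ===== SOURCE B (Python) =====
-- # B: one stable sort of the whole list by (source, -count), then a single run-scan
-- # that emits a group header whenever the source changes (no dict grouping).
-- from typing import List, Tuple
--
-- def _generate_flow_ascii(paths: List[Tuple[Tuple[str, str], int]]) -> str:
--     if not paths:
--         return "No knowledge flow data available"
--     lines = ["Knowledge Flow Visualization:", "=" * 50]
--     current = None
--     for (src, tgt), count in sorted(paths, key=lambda p: (p[0][0], -p[1])):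
--         if src != current:
--             lines.append(f"\n{src} (source)")
--             current = src
--         lines.append(f"  --> {tgt} ({count} knowledge transfers)")
--     return "\n".join(lines)
-- ===== Notes on version B (the rewrite author's own statement) =====
-- stated objective: alternative
-- what changed: Replaces A's defaultdict grouping plus per-source inner sorts with one stable sort of the whole list by (source, -count) followed by a single run-scan that emits a header whenever the source changes.
import Mathlib
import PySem

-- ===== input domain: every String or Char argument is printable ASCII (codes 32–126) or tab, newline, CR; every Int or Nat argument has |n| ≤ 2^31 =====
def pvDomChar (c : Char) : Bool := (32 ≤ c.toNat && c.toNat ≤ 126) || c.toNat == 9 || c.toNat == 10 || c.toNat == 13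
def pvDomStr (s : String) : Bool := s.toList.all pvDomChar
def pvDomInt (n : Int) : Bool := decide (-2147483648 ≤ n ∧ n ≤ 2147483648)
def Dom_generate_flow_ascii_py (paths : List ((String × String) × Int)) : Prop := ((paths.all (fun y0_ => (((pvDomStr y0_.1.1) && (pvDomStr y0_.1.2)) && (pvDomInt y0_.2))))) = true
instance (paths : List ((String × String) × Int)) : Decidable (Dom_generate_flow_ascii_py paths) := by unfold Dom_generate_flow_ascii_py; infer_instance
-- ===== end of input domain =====

-- B replaces A's dict grouping + nested sorted loops by ONE stable sort of the whole
-- list by (source, -count) followed by a single run-scan that emits a header on each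
-- source change (objective: alternative decomposition, same output).

-- shared f-string helpers (both Pythons build exactly these strings)
def pvHdr (s : String) : String := "\n" ++ s ++ " (source)"
def pvArrow (t : String) (c : Int) : String :=
  "  --> " ++ t ++ " (" ++ PySem.Int.toStr c ++ " knowledge transfers)"

-- ===== PORT A =====
def generate_flow_ascii_py (paths : List ((String × String) × Int)) : String :=
  if paths = [] then "No knowledge flow data available"
  else
    let lines0 : List String :=
      ["Knowledge Flow Visualization:", String.ofList (PySem.List.pyRepeat ['='] 50)]
    let sources : PySem.Dict String (List (String × Int)) :=
      paths.foldl (fun d p => d.modify p.1.1 [] (fun v => v ++ [(p.1.2, p.2)])) PySem.Dict.empty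
    -- sorted(sources.items()): dict keys are distinct, so Python's tuple comparison
    -- never reaches the second component; ported exactly as sort by the first component.
    let lines : List String :=
      (PySem.List.sorted sources.items (fun it => it.1) false).foldl
        (fun acc it =>
          (PySem.List.sorted it.2 (fun t => t.2) true).foldl
            (fun acc2 t => acc2 ++ [pvArrow t.1 t.2])
            (acc ++ [pvHdr it.1]))
        lines0
    PySem.Str.join "\n" lines

-- ===== PORT B =====
def pvStep (st : List String × Option String) (p : (String × String) × Int) :
    List String × Option String :=
  let st1 := if some p.1.1 ≠ st.2 then (st.1 ++ [pvHdr p.1.1], some p.1.1) else st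
  (st1.1 ++ [pvArrow p.1.2 p.2], st1.2)

def generate_flow_ascii_py_alt (paths : List ((String × String) × Int)) : String :=
  if paths = [] then "No knowledge flow data available"
  else
    let lines0 : List String :=
      ["Knowledge Flow Visualization:", String.ofList (PySem.List.pyRepeat ['='] 50)]
    let res :=
      (PySem.List.sorted2 paths (fun p => p.1.1) (fun p => -p.2) false).foldl
        pvStep (lines0, (none : Option String))
    PySem.Str.join "\n" res.1

-- ===== PRECONDITION & SPEC =====
def Spec_generate_flow_ascii_py (paths : List ((String × String) × Int)) (out : String) : Prop := out = generate_flow_ascii_py_alt paths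
instance (paths : List ((String × String) × Int)) (out : String) : Decidable (Spec_generate_flow_ascii_py paths out) := by unfold Spec_generate_flow_ascii_py; infer_instance

-- ===== CLAIM (what is proved, stated in full; the proofs are below) =====
def Claim_equal_generate_flow_ascii_py : Prop := ∀ (paths : List ((String × String) × Int)), Dom_generate_flow_ascii_py paths → Spec_generate_flow_ascii_py paths (generate_flow_ascii_py paths)

-- ===== LEMMAS AND PROOFS =====
def pvBSrc (a b : (String × String) × Int) : Bool :=
  decide (a.1.1 < b.1.1) || (!decide (b.1.1 < a.1.1) && decide (-a.2 < -b.2))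
def pvBCnt (a b : (String × String) × Int) : Bool := decide (b.2 < a.2)
def pvBStr (a b : String) : Bool := decide (a < b)

theorem pvBSrc_lt {x y : (String × String) × Int} (h : y.1.1 < x.1.1) : pvBSrc x y = false := by
  simp [pvBSrc, h, asymm h]
theorem pvBSrc_gt {x y : (String × String) × Int} (h : x.1.1 < y.1.1) : pvBSrc x y = true := by
  simp [pvBSrc, h]
theorem pvBSrc_eq {x y : (String × String) × Int} (h : y.1.1 = x.1.1) :
    pvBSrc x y = pvBCnt x y := by
  simp [pvBSrc, pvBCnt, h]

theorem pv_insertBy_append_not {α : Type} (before : α → α → Bool) (x : α)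
    (l1 l2 : List α) (h : ∀ y ∈ l1, before x y = false) :
    PySem.List.insertBy before x (l1 ++ l2) = l1 ++ PySem.List.insertBy before x l2 := by
  induction l1 with
  | nil => simp
  | cons a t ih =>
    have ha := h a (by simp)
    simp [PySem.List.insertBy, ha, ih (fun y hy => h y (by simp [hy]))]

theorem pv_insertBy_append_congr {α : Type} (before before' : α → α → Bool) (x : α)
    (l1 l2 : List α) (h1 : ∀ y ∈ l1, before x y = before' x y)
    (h2 : ∀ y ∈ l2, before x y = true) :
    PySem.List.insertBy before x (l1 ++ l2) = PySem.List.insertBy before' x l1 ++ l2 := by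
  induction l1 with
  | nil =>
    cases l2 with
    | nil => simp [PySem.List.insertBy]
    | cons b t => simp [PySem.List.insertBy, h2 b (by simp)]
  | cons a t ih =>
    have ha := h1 a (by simp)
    by_cases hb : before' x a = true
    · simp [PySem.List.insertBy, ha, hb]
    · simp only [Bool.not_eq_true] at hb
      simp [PySem.List.insertBy, ha, hb, ih (fun y hy => h1 y (by simp [hy]))]

theorem pv_step_mem (srcs : List String) (G : String → List ((String × String) × Int))
    (x : (String × String) × Int) (hpw : srcs.Pairwise (· < ·))
    (hG : ∀ s ∈ srcs, ∀ y ∈ G s, y.1.1 = s) (hx : x.1.1 ∈ srcs) :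
    PySem.List.insertBy pvBSrc x (srcs.flatMap G)
      = srcs.flatMap (fun s => if s = x.1.1 then PySem.List.insertBy pvBCnt x (G s) else G s) := by
  induction srcs with
  | nil => simp at hx
  | cons s rest ih =>
    rw [List.pairwise_cons] at hpw
    obtain ⟨hlt, hpw'⟩ := hpw
    by_cases hs : s = x.1.1
    · simp only [List.flatMap_cons]
      rw [pv_insertBy_append_congr pvBSrc pvBCnt x (G s) (rest.flatMap G)
        (fun y hy => pvBSrc_eq (by rw [hG s (by simp) y hy, hs]))
        (fun y hy => by
          obtain ⟨t, ht, hyt⟩ := List.mem_flatMap.mp hy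
          exact pvBSrc_gt (by rw [hG t (by simp [ht]) y hyt, ← hs]; exact hlt t ht))]
      have hrest : rest.flatMap (fun t => if t = x.1.1 then PySem.List.insertBy pvBCnt x (G t) else G t)
          = rest.flatMap G := by
        apply List.flatMap_congr
        intro t ht
        rw [if_neg (by intro he; exact absurd ((he.trans hs.symm) ▸ hlt t ht) (lt_irrefl t))]
      simp [hs, hrest]
    · have hx' : x.1.1 ∈ rest := by
        rcases List.mem_cons.mp hx with h | h
        · exact absurd h.symm hs
        · exact h
      have hslt : s < x.1.1 := hlt _ hx'
      simp only [List.flatMap_cons]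
      rw [pv_insertBy_append_not pvBSrc x (G s) (rest.flatMap G)
        (fun y hy => pvBSrc_lt (by rw [hG s (by simp) y hy]; exact hslt)),
        ih hpw' (fun t ht => hG t (by simp [ht])) hx']
      rw [if_neg (by intro he; exact absurd (he ▸ hslt) (lt_irrefl _))]

theorem pv_insertBy_all_true {α : Type} (before : α → α → Bool) (x : α)
    (l : List α) (h : ∀ y ∈ l, before x y = true) :
    PySem.List.insertBy before x l = x :: l := by
  cases l with
  | nil => simp [PySem.List.insertBy]
  | cons a t => simp [PySem.List.insertBy, h a (by simp)]

theorem pv_step_new (srcs : List String) (G : String → List ((String × String) × Int))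
    (x : (String × String) × Int) (hpw : srcs.Pairwise (· < ·))
    (hG : ∀ s ∈ srcs, ∀ y ∈ G s, y.1.1 = s) (hx : x.1.1 ∉ srcs) :
    PySem.List.insertBy pvBSrc x (srcs.flatMap G)
      = (PySem.List.insertBy pvBStr x.1.1 srcs).flatMap
          (fun s => if s = x.1.1 then [x] else G s) := by
  induction srcs with
  | nil => simp [PySem.List.insertBy]
  | cons s rest ih =>
    rw [List.pairwise_cons] at hpw
    obtain ⟨hlt, hpw'⟩ := hpw
    have hsne : s ≠ x.1.1 := fun he => hx (by simp [he])
    by_cases hcase : x.1.1 < s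
    · have hall : ∀ y ∈ (s :: rest).flatMap G, pvBSrc x y = true := by
        intro y hy
        obtain ⟨t, ht, hyt⟩ := List.mem_flatMap.mp hy
        apply pvBSrc_gt
        rw [hG t ht y hyt]
        rcases List.mem_cons.mp ht with h | h
        · exact h ▸ hcase
        · exact lt_trans hcase (hlt t h)
      rw [pv_insertBy_all_true pvBSrc x _ hall,
        pv_insertBy_all_true pvBStr x.1.1 (s :: rest) (by
          intro t ht
          simp only [pvBStr, decide_eq_true_eq]
          rcases List.mem_cons.mp ht with h | h
          · exact h ▸ hcase
          · exact lt_trans hcase (hlt t h))]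
      have hG' : (s :: rest).flatMap (fun t => if t = x.1.1 then [x] else G t)
          = (s :: rest).flatMap G := by
        apply List.flatMap_congr
        intro t ht
        rcases List.mem_cons.mp ht with h | h
        · rw [if_neg (h ▸ hsne)]
        · rw [if_neg (fun he => absurd (he ▸ lt_trans hcase (hlt t h)) (lt_irrefl _))]
      rw [show List.flatMap (fun t => if t = x.1.1 then [x] else G t) (x.1.1 :: s :: rest)
          = [x] ++ List.flatMap (fun t => if t = x.1.1 then [x] else G t) (s :: rest) from by
            rw [List.flatMap_cons, if_pos rfl], hG']
      simp
    · have hslt : s < x.1.1 := lt_of_le_of_ne (not_lt.mp hcase) hsne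
      simp only [List.flatMap_cons]
      rw [pv_insertBy_append_not pvBSrc x (G s) (rest.flatMap G)
        (fun y hy => pvBSrc_lt (by rw [hG s (by simp) y hy]; exact hslt)),
        ih hpw' (fun t ht => hG t (by simp [ht])) (fun h => hx (by simp [h]))]
      have : PySem.List.insertBy pvBStr x.1.1 (s :: rest)
          = s :: PySem.List.insertBy pvBStr x.1.1 rest := by
        simp [PySem.List.insertBy, pvBStr, asymm hslt]
      rw [this]
      simp [if_neg hsne]

def pvSrcs (paths : List ((String × String) × Int)) : List String :=
  PySem.List.sorted (PySem.Set.ofList (paths.map (fun p => p.1.1))) (fun s => s) false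
def pvGrp (paths : List ((String × String) × Int)) (s : String) :
    List ((String × String) × Int) :=
  PySem.List.sorted (paths.filter (fun p => p.1.1 == s)) (fun p => p.2) true

theorem pv_sorted2_foldl (paths : List ((String × String) × Int)) :
    PySem.List.sorted2 paths (fun p => p.1.1) (fun p => -p.2) false
      = paths.foldl (fun acc x => PySem.List.insertBy pvBSrc x acc) [] := rfl

theorem pv_hG (xs : List ((String × String) × Int)) :
    ∀ s ∈ pvSrcs xs, ∀ y ∈ pvGrp xs s, y.1.1 = s := by
  intro s _ y hy
  rw [pvGrp, PySem.List.mem_sorted] at hy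
  have := List.of_mem_filter hy
  simpa using this

theorem pv_grp_append (xs : List ((String × String) × Int))
    (x : (String × String) × Int) (s : String) :
    pvGrp (xs ++ [x]) s
      = if x.1.1 = s then PySem.List.insertBy pvBCnt x (pvGrp xs s) else pvGrp xs s := by
  unfold pvGrp
  rw [List.filter_append]
  by_cases h : x.1.1 = s
  · rw [if_pos h]
    rw [show List.filter (fun p => p.1.1 == s) [x] = [x] from by simp [h]]
    rw [PySem.List.sorted_rev_eq_foldl_insertBy, PySem.List.sorted_rev_eq_foldl_insertBy,
      List.foldl_append]
    rfl
  · rw [if_neg h]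
    rw [show List.filter (fun p => p.1.1 == s) [x] = [] from by simp [h]]
    simp

theorem pv_sort_decomp (paths : List ((String × String) × Int)) :
    PySem.List.sorted2 paths (fun p => p.1.1) (fun p => -p.2) false
      = (pvSrcs paths).flatMap (pvGrp paths) := by
  rw [pv_sorted2_foldl]
  induction paths using List.reverseRecOn with
  | nil => rfl
  | append_singleton xs x ih =>
    rw [List.foldl_append, List.foldl_cons, List.foldl_nil, ih]
    have hpw : (pvSrcs xs).Pairwise (· < ·) := PySem.List.sorted_ofList_pairwise_lt _
    have hmapmem : x.1.1 ∈ xs.map (fun p => p.1.1) ↔ x.1.1 ∈ pvSrcs xs := by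
      rw [pvSrcs, PySem.List.mem_sorted, PySem.Set.mem_ofList]
    by_cases hmem : x.1.1 ∈ pvSrcs xs
    · rw [pv_step_mem (pvSrcs xs) (pvGrp xs) x hpw (pv_hG xs) hmem]
      have hsrcs : pvSrcs (xs ++ [x]) = pvSrcs xs := by
        unfold pvSrcs
        simp only [List.map_append, List.map_cons, List.map_nil]
        rw [show PySem.Set.ofList (xs.map (fun p => p.1.1) ++ [x.1.1])
            = PySem.Set.add (PySem.Set.ofList (xs.map (fun p => p.1.1))) x.1.1 from by
          unfold PySem.Set.ofList; rw [List.foldl_append]; rfl]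
        rw [show PySem.Set.add (PySem.Set.ofList (xs.map (fun p => p.1.1))) x.1.1
            = PySem.Set.ofList (xs.map (fun p => p.1.1)) from by
          unfold PySem.Set.add
          rw [if_pos ((PySem.Set.contains_iff (PySem.Set.ofList (xs.map (fun p => p.1.1))) x.1.1).mpr
            ((PySem.Set.mem_ofList _ _).mpr (hmapmem.mpr hmem)))]]
      rw [hsrcs]
      apply List.flatMap_congr
      intro s hs
      rw [pv_grp_append]
      by_cases h : s = x.1.1
      · rw [if_pos h, if_pos h.symm]
      · rw [if_neg h, if_neg (fun he => h he.symm)]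
    · rw [pv_step_new (pvSrcs xs) (pvGrp xs) x hpw (pv_hG xs) hmem]
      have hsrcs : pvSrcs (xs ++ [x]) = PySem.List.insertBy pvBStr x.1.1 (pvSrcs xs) := by
        unfold pvSrcs
        simp only [List.map_append, List.map_cons, List.map_nil]
        rw [show PySem.Set.ofList (xs.map (fun p => p.1.1) ++ [x.1.1])
            = PySem.Set.ofList (xs.map (fun p => p.1.1)) ++ [x.1.1] from by
          rw [show PySem.Set.ofList (xs.map (fun p => p.1.1) ++ [x.1.1])
              = PySem.Set.add (PySem.Set.ofList (xs.map (fun p => p.1.1))) x.1.1 from by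
            unfold PySem.Set.ofList; rw [List.foldl_append]; rfl]
          unfold PySem.Set.add
          rw [if_neg (by
            intro hc
            exact hmem (hmapmem.mp ((PySem.Set.mem_ofList _ _).mp
              ((PySem.Set.contains_iff (PySem.Set.ofList (xs.map (fun p => p.1.1))) x.1.1).mp hc))))]]
        rw [PySem.List.sorted_eq_foldl_insertBy, PySem.List.sorted_eq_foldl_insertBy,
          List.foldl_append]
        rfl
      rw [hsrcs]
      apply List.flatMap_congr
      intro s hs
      rw [pv_grp_append]
      by_cases h : s = x.1.1
      · rw [if_pos h, if_pos h.symm]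
        have hempty : pvGrp xs s = [] := by
          unfold pvGrp
          rw [show List.filter (fun p => p.1.1 == s) xs = [] from by
            rw [List.filter_eq_nil_iff]
            intro p hp hps
            have hp1 : p.1.1 = s := by simpa using hps
            exact hmem (hmapmem.mp (List.mem_map.mpr ⟨p, hp, hp1.trans h⟩))]
          rfl
        rw [hempty]
        rfl
      · rw [if_neg h, if_neg (fun he => h he.symm)]

theorem pv_scan_group (l : List ((String × String) × Int)) (s : String)
    (h : ∀ y ∈ l, y.1.1 = s) (acc : List String) :
    l.foldl pvStep (acc, some s) = (acc ++ l.map (fun y => pvArrow y.1.2 y.2), some s) := by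
  induction l generalizing acc with
  | nil => simp
  | cons y t ih =>
    have hy : y.1.1 = s := h y (by simp)
    rw [List.foldl_cons, show pvStep (acc, some s) y = (acc ++ [pvArrow y.1.2 y.2], some s) from by
      simp [pvStep, hy], ih (fun z hz => h z (by simp [hz]))]
    simp

theorem pv_scan (srcs : List String) (G : String → List ((String × String) × Int))
    (hpw : srcs.Pairwise (· < ·)) (hG : ∀ s ∈ srcs, ∀ y ∈ G s, y.1.1 = s)
    (hne : ∀ s ∈ srcs, G s ≠ []) (cur : Option String)
    (hcur : ∀ s ∈ srcs, cur ≠ some s) (acc : List String) :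
    ∃ c, (srcs.flatMap G).foldl pvStep (acc, cur)
      = (acc ++ srcs.flatMap (fun s => pvHdr s :: (G s).map (fun y => pvArrow y.1.2 y.2)), c) := by
  induction srcs generalizing acc cur with
  | nil => exact ⟨cur, by simp⟩
  | cons s rest ih =>
    rw [List.pairwise_cons] at hpw
    obtain ⟨hlt, hpw'⟩ := hpw
    obtain ⟨y0, ys, hG0⟩ : ∃ y0 ys, G s = y0 :: ys := by
      cases hGs : G s with
      | nil => exact absurd hGs (hne s (by simp))
      | cons a b => exact ⟨a, b, rfl⟩
    have hy0 : y0.1.1 = s := hG s (by simp) y0 (by simp [hG0])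
    rw [List.flatMap_cons, List.foldl_append, hG0, List.foldl_cons]
    rw [show pvStep (acc, cur) y0 = (acc ++ [pvHdr s] ++ [pvArrow y0.1.2 y0.2], some s) from by
      simp [pvStep, hy0, (hcur s (by simp)).symm]]
    rw [pv_scan_group ys s (fun z hz => hG s (by simp) z (by simp [hG0, hz])) _]
    obtain ⟨c, hc⟩ := ih hpw' (fun t ht => hG t (by simp [ht])) (fun t ht => hne t (by simp [ht]))
      (some s) (fun t ht he => absurd ((Option.some_inj.mp he) ▸ hlt t ht) (lt_irrefl _))
      (acc ++ [pvHdr s] ++ [pvArrow y0.1.2 y0.2] ++ ys.map (fun y => pvArrow y.1.2 y.2))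
    exact ⟨c, by rw [hc]; simp [hG0]⟩

theorem pv_insertBy_map {α β : Type} (before : β → β → Bool) (before' : α → α → Bool)
    (f : α → β) (x : α) (l : List α) (hb : ∀ a b, before (f a) (f b) = before' a b) :
    PySem.List.insertBy before (f x) (l.map f) = (PySem.List.insertBy before' x l).map f := by
  induction l with
  | nil => simp [PySem.List.insertBy]
  | cons a t ih =>
    by_cases hc : before' x a = true
    · simp [PySem.List.insertBy, hb, hc]
    · simp only [Bool.not_eq_true] at hc
      simp [PySem.List.insertBy, hb, hc, ih]

theorem pv_foldl_insertBy_map {α β : Type} (before : β → β → Bool) (before' : α → α → Bool)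
    (f : α → β) (hb : ∀ a b, before (f a) (f b) = before' a b) (l : List α) (acc : List α) :
    l.foldl (fun acc a => PySem.List.insertBy before (f a) acc) (acc.map f)
      = (l.foldl (fun acc a => PySem.List.insertBy before' a acc) acc).map f := by
  induction l generalizing acc with
  | nil => simp
  | cons a t ih =>
    simp only [List.foldl_cons]
    rw [pv_insertBy_map before before' f a acc hb, ih]

theorem pv_sorted_map_false {α β κ : Type} [LT κ] [DecidableLT κ] (f : α → β) (key : β → κ)
    (l : List α) :
    PySem.List.sorted (l.map f) key false
      = (PySem.List.sorted l (fun a => key (f a)) false).map f := by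
  rw [PySem.List.sorted_eq_foldl_insertBy, PySem.List.sorted_eq_foldl_insertBy, List.foldl_map]
  have := pv_foldl_insertBy_map (fun a b => decide (key a < key b))
      (fun a b => decide (key (f a) < key (f b))) f (fun a b => rfl) l []
  simpa using this

theorem pv_sorted_map_true {α β κ : Type} [LT κ] [DecidableLT κ] (f : α → β) (key : β → κ)
    (l : List α) :
    PySem.List.sorted (l.map f) key true
      = (PySem.List.sorted l (fun a => key (f a)) true).map f := by
  rw [PySem.List.sorted_rev_eq_foldl_insertBy, PySem.List.sorted_rev_eq_foldl_insertBy,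
    List.foldl_map]
  have := pv_foldl_insertBy_map (fun a b => decide (key b < key a))
      (fun a b => decide (key (f b) < key (f a))) f (fun a b => rfl) l []
  simpa using this

theorem pv_a_lines (paths : List ((String × String) × Int)) (lines0 : List String) :
    (PySem.List.sorted
        (paths.foldl (fun d p => d.modify p.1.1 [] (fun v => v ++ [(p.1.2, p.2)]))
          PySem.Dict.empty).items (fun it => it.1) false).foldl
      (fun acc it =>
        (PySem.List.sorted it.2 (fun t => t.2) true).foldl
          (fun acc2 t => acc2 ++ [pvArrow t.1 t.2]) (acc ++ [pvHdr it.1])) lines0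
    = lines0 ++ (pvSrcs paths).flatMap
        (fun s => pvHdr s :: (pvGrp paths s).map (fun y => pvArrow y.1.2 y.2)) := by
  have hkeys : (paths.foldl (fun d p => d.modify p.1.1 [] (fun v => v ++ [(p.1.2, p.2)]))
      (PySem.Dict.empty : PySem.Dict String (List (String × Int)))).keys
      = PySem.Set.ofList (paths.map (fun p => p.1.1)) := by
    rw [PySem.Dict.keys_foldl_modify_key paths (fun p => p.1.1) []
      (fun _ p => (fun v => v ++ [(p.1.2, p.2)]))]
    rfl
  have hnd : (paths.foldl (fun d p => d.modify p.1.1 [] (fun v => v ++ [(p.1.2, p.2)]))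
      (PySem.Dict.empty : PySem.Dict String (List (String × Int)))).keys.Nodup := by
    apply PySem.Dict.nodup_keys_foldl_modify_key paths (fun p => p.1.1) []
      (fun _ p => (fun v => v ++ [(p.1.2, p.2)]))
    simp [PySem.Dict.keys_empty]
  have hgetD : ∀ s, (paths.foldl (fun d p => d.modify p.1.1 [] (fun v => v ++ [(p.1.2, p.2)]))
      (PySem.Dict.empty : PySem.Dict String (List (String × Int)))).getD s []
      = (paths.filter (fun p => p.1.1 == s)).map (fun p => (p.1.2, p.2)) := by
    intro s
    have h := PySem.Dict.getD_foldl_modify_append (paths.map (fun p => (p.1.1, (p.1.2, p.2))))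
      (PySem.Dict.empty : PySem.Dict String (List (String × Int))) s
    rw [List.foldl_map] at h
    simpa [List.filter_map, Function.comp, List.map_map] using h
  rw [PySem.Dict.items_eq_map_keys _ hnd []]
  set D := paths.foldl (fun d p => d.modify p.1.1 [] (fun v => v ++ [(p.1.2, p.2)]))
    (PySem.Dict.empty : PySem.Dict String (List (String × Int))) with hDdef
  rw [hkeys]
  rw [pv_sorted_map_false (fun k => (k, D.getD k [])) (fun it => it.1)
    (PySem.Set.ofList (paths.map (fun p => p.1.1)))]
  rw [List.foldl_map]
  have hbody : (fun (acc : List String) k =>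
      (PySem.List.sorted (D.getD k []) (fun t => t.2) true).foldl
        (fun acc2 t => acc2 ++ [pvArrow t.1 t.2]) (acc ++ [pvHdr k]))
      = (fun acc k => acc ++ (pvHdr k :: (pvGrp paths k).map (fun y => pvArrow y.1.2 y.2))) := by
    funext acc k
    rw [hgetD k, pv_sorted_map_true (fun p => ((p.1.2 : String), (p.2 : Int))) (fun t => t.2)
      (paths.filter (fun p => p.1.1 == k))]
    rw [PySem.List.foldl_append_singleton_eq_map]
    rw [List.map_map]
    simp [pvGrp]
  rw [show (fun (acc : List String) k =>
      (PySem.List.sorted ((fun k => (k, D.getD k [])) k).2 (fun t => t.2) true).foldl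
        (fun acc2 t => acc2 ++ [pvArrow t.1 t.2])
        (acc ++ [pvHdr ((fun k => (k, D.getD k [])) k).1]))
      = (fun acc k => acc ++ (pvHdr k :: (pvGrp paths k).map (fun y => pvArrow y.1.2 y.2)))
    from hbody]
  rw [PySem.List.foldl_append_eq_flatMap]
  rfl

theorem pv_grp_ne (paths : List ((String × String) × Int)) (s : String)
    (hs : s ∈ pvSrcs paths) : pvGrp paths s ≠ [] := by
  intro h
  rw [pvGrp, PySem.List.sorted_eq_nil_iff, List.filter_eq_nil_iff] at h
  rw [pvSrcs, PySem.List.mem_sorted, PySem.Set.mem_ofList, List.mem_map] at hs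
  obtain ⟨p, hp, hps⟩ := hs
  exact h p hp (by simp [hps])

-- ===== VERDICT (by name: the statement is the Claim_ definition above) =====
theorem generate_flow_ascii_py_spec : Claim_equal_generate_flow_ascii_py := by
  intro paths _
  unfold Spec_generate_flow_ascii_py generate_flow_ascii_py generate_flow_ascii_py_alt
  by_cases hnil : paths = []
  · simp [hnil]
  · rw [if_neg hnil, if_neg hnil]
    simp only [pv_a_lines paths, pv_sort_decomp paths]
    obtain ⟨c, hc⟩ := pv_scan (pvSrcs paths) (pvGrp paths)
      (PySem.List.sorted_ofList_pairwise_lt _) (pv_hG paths)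
      (pv_grp_ne paths) none (fun s _ h => by simp at h)
      ["Knowledge Flow Visualization:", String.ofList (PySem.List.pyRepeat ['='] 50)]
    rw [hc]
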